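-- pv_equiv track=rewrite | github.com/aishwaryaravichandran/soccerleague | league_builder.py | player_assigning
-- ===== SOURCE A (Python) =====
-- def player_grouping(players):
--
--     # create a list for each group and return them together as a tuple
--     inexperienced = [player for player in players
--                      if player['Soccer Experience'] != "YES"]
--     experienced = [player for player in players
--                    if player['Soccer Experience'] == "YES"]
--
--     return experienced, inexperienced
--
-- def player_assigning(players, team_list):
--     index = 0
--     sorted_players = player_grouping(players)
--     player_list = []
--     teams = [key for key, values in team_list.items()]
--
--     # looping through experienced and inexperienced group
--     for group in sorted_players:
--         range = len(teams) - 1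
--         # looping through each player in group and assigning them to each team
--         for player in group:
--             # assigning teams for the players
--             player['Team'] = teams[index]
--             player_list.append(player)
--             if index < range:
--                 index += 1
--             else:
--                 index = 0
--     return player_list
-- ===== SOURCE B (Python) =====
-- def player_assigning(players, team_list):
--     # Note: like A, this mutates the player dicts in place (sets 'Team').
--     order = sorted(players, key=lambda p: p['Soccer Experience'] != "YES")
--     teams = list(team_list)
--     schedule = teams * (len(order) // len(teams) + 1) if teams else []
--     for player, team in zip(order, schedule):
--         player['Team'] = team
--     return order
-- ===== Notes on version B (the rewrite author's own statement) =====
-- stated objective: alternative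
-- what changed: Replaces the two filter passes by one stable sort on the boolean experience key, and replaces the counter/reset round-robin state machine by precomputing a repeated team schedule list and zipping it with the players, returning the sorted list itself instead of re-appending into a new list.
import Mathlib
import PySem

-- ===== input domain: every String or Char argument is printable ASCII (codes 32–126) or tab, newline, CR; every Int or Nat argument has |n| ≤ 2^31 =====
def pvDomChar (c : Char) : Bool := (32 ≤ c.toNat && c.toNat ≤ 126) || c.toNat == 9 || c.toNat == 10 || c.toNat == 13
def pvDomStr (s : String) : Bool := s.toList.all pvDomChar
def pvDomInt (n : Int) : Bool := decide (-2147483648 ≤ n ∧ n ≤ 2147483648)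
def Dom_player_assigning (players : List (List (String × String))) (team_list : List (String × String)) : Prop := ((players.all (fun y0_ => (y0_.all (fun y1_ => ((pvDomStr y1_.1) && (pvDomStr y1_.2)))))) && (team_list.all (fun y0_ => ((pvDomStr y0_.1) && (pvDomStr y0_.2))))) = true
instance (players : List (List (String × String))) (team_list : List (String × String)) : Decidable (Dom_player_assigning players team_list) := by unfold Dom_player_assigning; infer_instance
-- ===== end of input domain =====

-- B replaces A's two filter passes + counter/reset state machine by a stable sort on the
-- boolean experience key zipped with a precomputed repeated team schedule (objective: alternative).
-- Both Pythons mutate the player dicts in place; the equivalence proved here is about the return value.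


-- ===== PORT A =====
-- player_grouping: (experienced, inexperienced); player['Soccer Experience'] is total under
-- Pre_ (key present), ported as Dict.getD with an unused default.
def pvGroupingA (players : List (List (String × String))) :
    List (List (String × String)) × List (List (String × String)) :=
  let inexperienced := players.filter
    (fun p => !((PySem.Dict.ofList p).getD "Soccer Experience" "" == "YES"))
  let experienced := players.filter
    (fun p => (PySem.Dict.ofList p).getD "Soccer Experience" "" == "YES")
  (experienced, inexperienced)

-- body of A's inner loop: assign teams[index] (in range under Pre_), append, bump/reset index
def pvStepA (teams : List String) (st : Int × List (List (String × String)))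
    (player : List (String × String)) : Int × List (List (String × String)) :=
  let p := ((PySem.Dict.ofList player).insert "Team" ((PySem.List.pyGet? teams st.1).getD "")).items
  (if st.1 < (teams.length : Int) - 1 then st.1 + 1 else 0, st.2 ++ [p])

def player_assigning (players : List (List (String × String))) (team_list : List (String × String)) : List (List (String × String)) :=
  let sorted_players := pvGroupingA players
  let teams := (PySem.Dict.ofList team_list).keys
  let st := [sorted_players.1, sorted_players.2].foldl
    (fun st group => group.foldl (pvStepA teams) st) ((0 : Int), [])
  st.2

-- ===== PORT B =====
-- the in-place assignment player['Team'] = team, as the resulting dict value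
def pvAssignB (pt : List (String × String) × String) : List (String × String) :=
  ((PySem.Dict.ofList pt.1).insert "Team" pt.2).items

-- Source B: stable sort by the boolean key, repeated team schedule, zip; the returned `order`
-- holds the zipped players mutated plus any players the (possibly shorter) zip left untouched.
def player_assigning_alt (players : List (List (String × String))) (team_list : List (String × String)) : List (List (String × String)) :=
  let order := PySem.List.sorted players
    (fun p => !((PySem.Dict.ofList p).getD "Soccer Experience" "" == "YES"))
  let teams := (PySem.Dict.ofList team_list).keys
  -- teams * (len(order) // len(teams) + 1): Python // on the nonnegative lengths = Nat division
  let schedule := if teams = [] then [] else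
    (List.replicate (order.length / teams.length + 1) teams).flatten
  (order.zip schedule).map pvAssignB ++ order.drop schedule.length

-- ===== PRECONDITION & SPEC =====
-- Pre_ excludes exactly the inputs where A raises: a player dict without the key
-- 'Soccer Experience' (KeyError), or a non-empty players list with an empty team dict
-- (IndexError on teams[index]).
def Pre_player_assigning (players : List (List (String × String))) (team_list : List (String × String)) : Prop :=
  (players = [] ∨ team_list ≠ []) ∧
  ∀ p ∈ players, (PySem.Dict.ofList p).contains "Soccer Experience" = true
instance (players : List (List (String × String))) (team_list : List (String × String)) : Decidable (Pre_player_assigning players team_list) := by unfold Pre_player_assigning; infer_instance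

def pvWitness_player_assigning : (List (List (String × String))) × (List (String × String)) :=
  ([[("Name", "Ann"), ("Soccer Experience", "YES")], [("Name", "Bob"), ("Soccer Experience", "NO")]],
   [("Sharks", "x"), ("Dragons", "y")])

def Spec_player_assigning (players : List (List (String × String))) (team_list : List (String × String)) (out : List (List (String × String))) : Prop := out = player_assigning_alt players team_list
instance (players : List (List (String × String))) (team_list : List (String × String)) (out : List (List (String × String))) : Decidable (Spec_player_assigning players team_list out) := by unfold Spec_player_assigning; infer_instance

-- ===== CLAIM (what is proved, stated in full; the proofs are below) =====
def Claim_equal_player_assigning : Prop := ∀ (players : List (List (String × String))) (team_list : List (String × String)), Dom_player_assigning players team_list → Pre_player_assigning players team_list → Spec_player_assigning players team_list (player_assigning players team_list)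

-- ===== LEMMAS AND PROOFS =====

-- Stable insertion of x into a false-block ++ true-block list (boolean keys).
theorem pv_insert_split {α : Type} (key : α → Bool) (x : α) :
    ∀ (F T : List α), (∀ y ∈ F, key y = false) → (∀ y ∈ T, key y = true) →
      PySem.List.insertBy (fun a b => decide (key a < key b)) x (F ++ T)
        = if key x then F ++ T ++ [x] else F ++ x :: T := by
  intro F
  induction F with
  | nil =>
    intro T _ hT
    simp only [List.nil_append]
    induction T with
    | nil =>
      by_cases h : key x = true <;> simp [PySem.List.insertBy, h]
    | cons y ys ih =>
      have hy : key y = true := hT y (by simp)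
      by_cases h : key x = true
      · have hbef : decide (key x < key y) = false := by rw [h, hy]; decide
        have ih' := ih (fun z hz => hT z (by simp [hz]))
        rw [if_pos h] at ih'
        rw [if_pos h]
        simp [PySem.List.insertBy, hbef, ih']
      · have h' : key x = false := by simpa using h
        have hbef : decide (key x < key y) = true := by rw [h', hy]; decide
        rw [if_neg h]
        simp [PySem.List.insertBy, hbef]
  | cons f F' ih =>
    intro T hF hT
    have hf : key f = false := hF f (by simp)
    have hbef : decide (key x < key f) = false := by
      rw [hf]; cases hkx : key x <;> decide
    have ih' := ih T (fun z hz => hF z (by simp [hz])) hT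
    by_cases h : key x = true
    · rw [if_pos h] at ih'
      rw [if_pos h]
      simp [PySem.List.insertBy, hbef, ih']
    · rw [if_neg h] at ih'
      rw [if_neg h]
      simp [PySem.List.insertBy, hbef, ih']

-- Folding stable insertion keeps the false-block / true-block split.
theorem pv_foldl_insert_split {α : Type} (key : α → Bool) :
    ∀ (l F T : List α), (∀ y ∈ F, key y = false) → (∀ y ∈ T, key y = true) →
      l.foldl (fun acc x => PySem.List.insertBy (fun a b => decide (key a < key b)) x acc) (F ++ T)
        = (F ++ l.filter (fun x => !key x)) ++ (T ++ l.filter key) := by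
  intro l
  induction l with
  | nil => intro F T _ _; simp
  | cons x l ih =>
    intro F T hF hT
    rw [List.foldl_cons, pv_insert_split key x F T hF hT]
    by_cases h : key x = true
    · rw [if_pos h]
      have hre : F ++ T ++ [x] = F ++ (T ++ [x]) := by simp
      rw [hre, ih F (T ++ [x]) hF (by intro z hz
                                      rcases List.mem_append.mp hz with h' | h'
                                      · exact hT z h'
                                      · simp at h'; subst h'; exact h)]
      simp [h]
    · have h' : key x = false := by simpa using h
      rw [if_neg h]
      have hre : F ++ x :: T = (F ++ [x]) ++ T := by simp
      rw [hre, ih (F ++ [x]) T (by intro z hz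
                                   rcases List.mem_append.mp hz with h' | h''
                                   · exact hF z h'
                                   · simp at h''; subst h''; exact h') hT]
      simp [h']

-- Stable sort by a boolean key = false-keyed elements then true-keyed elements, orders kept.
theorem pv_sorted_split {α : Type} (key : α → Bool) (l : List α) :
    PySem.List.sorted l key = l.filter (fun x => !key x) ++ l.filter key := by
  rw [PySem.List.sorted_eq_foldl_insertBy]
  simpa using pv_foldl_insert_split key l [] [] (by simp) (by simp)

-- Core loop correspondence: A's counter fold from index j equals B's zip with the
-- remaining schedule (suffix of teams from j, then m more full rounds).
theorem pv_loop (teams : List String) :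
    ∀ (l : List (List (String × String))) (j m : Nat) (acc : List (List (String × String))),
      j < teams.length → l.length ≤ (teams.length - j) + m * teams.length →
      (l.foldl (pvStepA teams) ((j : Int), acc)).2
        = acc ++ (l.zip (teams.drop j ++ (List.replicate m teams).flatten)).map pvAssignB := by
  intro l
  induction l with
  | nil => intro j m acc _ _; simp
  | cons p l ih =>
    intro j m acc hj hlen
    have hlen' : l.length + 1 ≤ (teams.length - j) + m * teams.length := by simpa using hlen
    have hdrop := List.drop_eq_getElem_cons hj
    have hstep : pvStepA teams ((j : Int), acc) p
        = (if (j : Int) < (teams.length : Int) - 1 then (j : Int) + 1 else 0,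
           acc ++ [pvAssignB (p, teams[j])]) := by
      simp [pvStepA, pvAssignB, PySem.List.pyGet?_natCast, List.getElem?_eq_getElem hj]
    rw [List.foldl_cons, hstep, hdrop]
    simp only [List.cons_append, List.zip_cons_cons, List.map_cons]
    by_cases hc : j + 1 < teams.length
    · have hcond : (j : Int) < (teams.length : Int) - 1 := by
        have : (j : Int) + 1 < (teams.length : Int) := by exact_mod_cast hc
        omega
      rw [if_pos hcond]
      have hcast : ((j : Int) + 1) = ((j + 1 : Nat) : Int) := by push_cast; ring
      rw [hcast, ih (j + 1) m (acc ++ [pvAssignB (p, teams[j])]) hc (by omega)]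
      simp
    · have hj1 : j + 1 = teams.length := by omega
      have hcond : ¬ ((j : Int) < (teams.length : Int) - 1) := by
        have : ((j : Int) + 1) = (teams.length : Int) := by exact_mod_cast hj1
        omega
      rw [if_neg hcond]
      have hdropnil : teams.drop (j + 1) = [] := List.drop_eq_nil_iff.mpr (by omega)
      rw [hdropnil]
      simp only [List.nil_append]
      cases l with
      | nil => simp
      | cons q l' =>
        cases m with
        | zero =>
          exfalso
          have hql : (q :: l').length = l'.length + 1 := rfl
          omega
        | succ m' =>
          have hmul : (m' + 1) * teams.length = teams.length + m' * teams.length := by ring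
          have hlen'' : (q :: l').length ≤ (teams.length - 0) + m' * teams.length := by
            have hql : (q :: l').length = l'.length + 1 := rfl
            omega
          have hflat : (List.replicate (m' + 1) teams).flatten
              = teams.drop 0 ++ (List.replicate m' teams).flatten := by
            simp [List.replicate_succ]
          have h0 : (0 : Int) = ((0 : Nat) : Int) := by norm_num
          rw [hflat, h0, ih 0 m' (acc ++ [pvAssignB (p, teams[j])]) (by omega) hlen'']
          simp

-- len(flatten(replicate k teams)) = k * len(teams)
theorem pv_len_flat (k : Nat) (teams : List String) :
    (List.replicate k teams).flatten.length = k * teams.length := by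
  simp [List.length_flatten, List.map_replicate, List.sum_replicate, smul_eq_mul]

-- a non-empty dict has non-empty keys
theorem pv_keys_ne (q : String × String) (qs : List (String × String)) :
    (PySem.Dict.ofList (q :: qs)).keys ≠ [] := by
  have hre : PySem.Dict.ofList (q :: qs)
      = (q :: qs).foldl (fun d p => d.insert p.1 p.2) PySem.Dict.empty := rfl
  have hk : q.1 ∈ (PySem.Dict.ofList (q :: qs)).keys := by
    rw [hre, PySem.Dict.keys_foldl_insert_key (q :: qs) (fun p => p.1)
      (fun _ p => p.2) PySem.Dict.empty]
    rw [PySem.Set.mem_update]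
    simp
  intro hc
  rw [hc] at hk
  exact List.not_mem_nil hk

-- ===== VERDICT (by name: the statement is the Claim_ definition above) =====
theorem player_assigning_spec : Claim_equal_player_assigning := by
  intro players team_list _hdom hpre
  unfold Spec_player_assigning player_assigning player_assigning_alt pvGroupingA
  dsimp only
  set key : List (String × String) → Bool :=
    fun p => !((PySem.Dict.ofList p).getD "Soccer Experience" "" == "YES") with hkey
  set teams := (PySem.Dict.ofList team_list).keys with hteams
  have hfiltexp : players.filter (fun x => !key x)
      = players.filter (fun p => (PySem.Dict.ofList p).getD "Soccer Experience" "" == "YES") := by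
    apply List.filter_congr; intro a _; simp [hkey]
  by_cases hp : players = []
  · subst hp
    have hs0 : PySem.List.sorted ([] : List (List (String × String))) key = [] := by
      simp [pv_sorted_split]
    simp [hs0]
  · -- teams is non-empty
    have hne : team_list ≠ [] := by
      rcases hpre.1 with h | h
      · exact absurd h hp
      · exact h
    have hteamsne : teams ≠ [] := by
      rw [hteams]
      cases team_list with
      | nil => exact absurd rfl hne
      | cons q qs => exact pv_keys_ne q qs
    have hT : 0 < teams.length := List.length_pos_iff.mpr hteamsne
    have hdm := Nat.mod_add_div (PySem.List.sorted players key).length teams.length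
    have hmlt := Nat.mod_lt (PySem.List.sorted players key).length hT
    have hexp : ((PySem.List.sorted players key).length / teams.length + 1) * teams.length
        = teams.length * ((PySem.List.sorted players key).length / teams.length)
          + teams.length := by ring
    have hcomm : ((PySem.List.sorted players key).length / teams.length) * teams.length
        = teams.length * ((PySem.List.sorted players key).length / teams.length) := by ring
    have hbound : (PySem.List.sorted players key).length ≤ (teams.length - 0)
        + ((PySem.List.sorted players key).length / teams.length) * teams.length := by omega
    have hloop := pv_loop teams (PySem.List.sorted players key) 0
      ((PySem.List.sorted players key).length / teams.length) [] hT hbound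
    have h0 : ((0 : Nat) : Int) = (0 : Int) := by norm_num
    rw [h0] at hloop
    have hdropnil : (PySem.List.sorted players key).drop
        ((List.replicate ((PySem.List.sorted players key).length / teams.length + 1)
          teams).flatten.length) = [] := by
      rw [pv_len_flat, List.drop_eq_nil_iff]
      omega
    have hflat : (List.replicate ((PySem.List.sorted players key).length / teams.length + 1)
          teams).flatten
        = teams.drop 0 ++ (List.replicate
            ((PySem.List.sorted players key).length / teams.length) teams).flatten := by
      simp [List.replicate_succ]
    have hfoldA : ([players.filter (fun p => (PySem.Dict.ofList p).getD "Soccer Experience" "" == "YES"),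
          players.filter (fun p => !((PySem.Dict.ofList p).getD "Soccer Experience" "" == "YES"))].foldl
          (fun st group => group.foldl (pvStepA teams) st) ((0 : Int), []))
        = (PySem.List.sorted players key).foldl (pvStepA teams) ((0 : Int), []) := by
      rw [pv_sorted_split key players, hfiltexp]
      simp [List.foldl_append, hkey]
    rw [if_neg hteamsne, hfoldA, hloop, hdropnil, hflat]
    simp
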